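/- GENERATED by mk_final_copies.py from the proof of the farm's unit `decode_residue.6a` (farm:decode_residue.6a.1: Lemmas.lean) as the
   re-elaboration sweep compiled it — do not edit. -/
import Asan.CheckWalk
import Vorbis.Spec.Units.decode_residue_6a

/-
  LEMMAS of the proof unit `decode_residue.6a` (path A, `ch > 2`: the `while` head 0x10f64c, the i-loop's entry 0x10f692, the loop
  condition 0x10f551 … 0x10f573 / 0x10f645), from the worker of decode_residue.6 (attempt 1). The assertions `AtInner`, `AtTurn` are the
  tree's (Vorbis/Spec/DecodeResidue46.lean).

      ownWins g, stack_read, common_of_stack        COMMON over stores into the own frame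
      blks_kept_of_stack tb_kept_of_stack reads_of_stack fill_of_stack winv_of_stack winner_of_stack patha_of_stack
                                                    the loop invariants WA / WInner / FILL / PathA over such stores
      idiv_small, idiv_nat                          `cdq ; idiv` of `0 ≤ z ≤ 8192` by `1 ≤ ch ≤ 16`: no #DE, quotient and remainder
      head_walk, inner_init, loop_cond              the three walks of `Seg6a`
-/
namespace Vorbis.Spec.decode_residue_6a
open X86 X86.User Asan Vorbis Vorbis.Spec Vorbis.Spec.DecodeResidue

/-- The windows of the own stack frame that path A stores to between two cut points: `[RA−848, RA−248)` (below the steady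
stack pointer), `class_set = [rbp−0xd8, +4)`, `[rbp−0xb8, +4)`, `[rbp−0x98, +4)`, `c_inter = [rbp−0x60, +4)`, `p_inter = [rbp−0x50, +4)`. -/
def ownWins (g : G) : List Span :=
  [⟨g.RA - 848, g.RA - 248⟩, ⟨g.RA - 224, g.RA - 220⟩, ⟨g.RA - 192, g.RA - 188⟩, ⟨g.RA - 160, g.RA - 156⟩,
   ⟨g.RA - 104, g.RA - 100⟩, ⟨g.RA - 88, g.RA - 84⟩]

/-- Every window of `ownWins` lies inside the stack window `[RA − 848, RA)` of the contract's footprint. -/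
theorem ownWins_stack (g : G) (hroom : 0x700000 + 848 ≤ g.RA) :
    ∀ w, w ∈ ownWins g → g.RA - 848 ≤ w.lo ∧ w.hi ≤ g.RA ∧ w.lo ≤ w.hi := by
  intro w hw
  simp only [ownWins, List.mem_cons, List.mem_nil_iff, or_false] at hw
  rcases hw with rfl | rfl | rfl | rfl | rfl | rfl <;> simp only [] <;> omega

/-- The value of a stack address `RA − k` as a number. -/
theorem toNat_slot6 (g : G) (hroom : 0x700000 + 848 ≤ g.RA) (k : Nat) (hk : k ≤ 848) :
    (g.e.reg .rsp - UInt64.ofNat k).toNat = g.RA - k := by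
  have e : (g.e.reg .rsp).toNat = g.RA := rfl
  have hlt := (g.e.reg .rsp).toNat_lt
  have hk' : (UInt64.ofNat k).toNat = k := by
    rw [UInt64.toNat_ofNat']
    exact Nat.mod_eq_of_lt (by omega)
  have hle : UInt64.ofNat k ≤ g.e.reg .rsp := by
    rw [UInt64.le_iff_toNat_le, hk', e]
    omega
  rw [UInt64.toNat_sub_of_le _ _ hle, hk', e]

/-- **A slot of the frame outside `ownWins` reads the same**: `[RA − k, RA − k + n)` with `n ≤ k ≤ 848`, disjoint from the six
windows (for a literal `k`, `n` the last hypothesis is `by omega`). -/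
theorem stack_read {g : G} {m m' : Mem} (hroom : 0x700000 + 848 ≤ g.RA ∧ g.RA + 8 ≤ 0x800000)
    (hs : Mem.SameExcept (ownWins g) m m') (k n : Nat) (hn : n ≤ k) (hk : k ≤ 848)
    (hoff : (848 ≤ k - n ∨ k ≤ 248) ∧ (224 ≤ k - n ∨ k ≤ 220) ∧ (192 ≤ k - n ∨ k ≤ 188) ∧ (160 ≤ k - n ∨ k ≤ 156) ∧ (104 ≤ k - n ∨ k ≤ 100) ∧
      (88 ≤ k - n ∨ k ≤ 84)) :
    m'.readLE (g.e.reg .rsp - UInt64.ofNat k) n = m.readLE (g.e.reg .rsp - UInt64.ofNat k) n := by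
  have e := toNat_slot6 g hroom.1 k hk
  apply hs.readLE
  · rw [e]
    omega
  · intro w hw
    rw [e]
    simp only [ownWins, List.mem_cons, List.mem_nil_iff, or_false] at hw
    rcases hw with rfl | rfl | rfl | rfl | rfl | rfl <;> simp only [] <;> omega

/-- A span that does not meet the stack region misses every window of `ownWins`. -/
theorem ownWins_off (g : G) (hroom : 0x700000 + 848 ≤ g.RA ∧ g.RA + 8 ≤ 0x800000) {lo hi : Nat}
    (h : hi ≤ 0x700000 ∨ 0x800000 ≤ lo) : ∀ w, w ∈ ownWins g → hi ≤ w.lo ∨ w.hi ≤ lo := by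
  intro w hw
  have := ownWins_stack g hroom.1 w hw
  omega

/-- **COMMON is kept by stores into the own frame's scratch windows** (`ownWins`): the frame facts FR read slots outside the
windows; the footprint grows inside its stack window; the shadow, `*f`, the temp block, the configuration lie off the stack.
The registers and the two state facts are the walker's. -/
theorem common_of_stack {u₀ : State} {g : G} (he : Entered u₀ g) {v v' : State} (c : Common u₀ g v)
    (hs : Mem.SameExcept (ownWins g) v.mem v'.mem)
    (rbp : v'.reg .rbp = g.e.reg .rsp - 8) (rsp : v'.reg .rsp = g.e.reg .rsp - 248)
    (code : CodeOK u₀ v'.mem) (inv : abiInv v') : Common u₀ g v' := by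
  have hroom := he.room
  have hob : g.Blk (objBlock g.f) := he.vorbis.obj
  have hobst := he.pre.free.offStack _ hob
  have hobin := he.pre.env.ok.inside _ hob
  simp only [vblock, voff] at hobst hobin
  -- a slot outside the windows
  have rd : ∀ (k n : Nat), n ≤ k → k ≤ 848 →
      ((848 ≤ k - n ∨ k ≤ 248) ∧ (224 ≤ k - n ∨ k ≤ 220) ∧ (192 ≤ k - n ∨ k ≤ 188) ∧ (160 ≤ k - n ∨ k ≤ 156) ∧ (104 ≤ k - n ∨ k ≤ 100) ∧
        (88 ≤ k - n ∨ k ≤ 84)) →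
      v'.mem.readLE (g.e.reg .rsp - UInt64.ofNat k) n = v.mem.readLE (g.e.reg .rsp - UInt64.ofNat k) n :=
    fun k n hn hk hoff => stack_read hroom hs k n hn hk hoff
  -- a span of `*f` is off the windows
  have offObj : ∀ lo hi : Nat, g.f ≤ lo → hi ≤ g.f + 1808 → ∀ w, w ∈ ownWins g → hi ≤ w.lo ∨ w.hi ≤ lo := by
    intro lo hi h1 h2
    exact ownWins_off g hroom (by omega)
  apply Common.of_frame he rbp rsp code inv
  · exact (congrArg UInt64.ofNat (rd 8 8 (by omega) (by omega) (by omega))).trans c.s_rbp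
  · exact (congrArg UInt64.ofNat (rd 16 8 (by omega) (by omega) (by omega))).trans c.s_r15
  · exact (congrArg UInt64.ofNat (rd 24 8 (by omega) (by omega) (by omega))).trans c.s_r14
  · exact (congrArg UInt64.ofNat (rd 32 8 (by omega) (by omega) (by omega))).trans c.s_r13
  · exact (congrArg UInt64.ofNat (rd 40 8 (by omega) (by omega) (by omega))).trans c.s_r12
  · exact (congrArg UInt64.ofNat (rd 48 8 (by omega) (by omega) (by omega))).trans c.s_rbx
  · exact (congrArg UInt64.ofNat (rd 184 8 (by omega) (by omega) (by omega))).trans c.fr_f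
  · exact (congrArg UInt64.ofNat (rd 216 8 (by omega) (by omega) (by omega))).trans c.fr_rb
  · exact (rd 156 4 (by omega) (by omega) (by omega)).trans c.fr_ch
  · exact (rd 196 4 (by omega) (by omega) (by omega)).trans c.fr_prd
  · exact (rd 200 4 (by omega) (by omega) (by omega)).trans c.fr_w
  · exact (rd 232 4 (by omega) (by omega) (by omega)).trans c.fr_rtype
  · exact (rd 176 8 (by omega) (by omega) (by omega)).trans c.fr_pcd
  · exact (rd 240 8 (by omega) (by omega) (by omega)).trans c.fr_si
  · -- the footprint: the windows lie inside its stack window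
    apply c.same.trans
    apply hs.mono
    intro w hw a h1 h2
    have hw' := ownWins_stack g hroom.1 w hw
    refine ⟨⟨(g.e.reg .rsp).toNat - 848, (g.e.reg .rsp).toNat⟩, ?_, ?_, ?_⟩
    · unfold Spec.footprint
      exact List.mem_cons_self ..
    · show (g.e.reg .rsp).toNat - 848 ≤ a
      have e : (g.e.reg .rsp).toNat = g.RA := rfl
      omega
    · show a < (g.e.reg .rsp).toNat
      have e : (g.e.reg .rsp).toNat = g.RA := rfl
      omega
  · -- the shadow layer: no shadow byte is on the stack
    apply c.shadow.untouched
    exact hs.eqOn _ _ (ownWins_off g hroom (by omega))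
  · -- Bits: the four windows of `*f` it reads
    apply c.point.vorbis.bits.frame_fields
    apply Bits.SameFields.of_sameExcept hs
    · exact offObj _ _ (by omega) (by omega)
    · exact offObj _ _ (by omega) (by omega)
    · exact offObj _ _ (by omega) (by omega)
    · exact offObj _ _ (by omega) (by omega)
  · -- ADOBusy: the arena fields of `*f`
    have hb : ADOBusy g.A' g.others' v.mem g.f g.sz := c.point.busy
    apply hb.transfer
    apply ObjEq.of_sameExcept hs
    · intro w hw
      have := (by decide : WinsBelow ADO.wins 1808) w hw
      omega
    · intro w hw s hsp
      have hb' := (by decide : WinsBelow ADO.wins 1808) w hw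
      have hw1 : w.1 ≤ w.2 ∨ w.2 ≤ w.1 := by omega
      exact offObj (g.f + w.1) (g.f + w.2) (by omega) (by omega) s hsp
  · -- TB: the temp block lies in the arena, off the stack
    have hb : ADOBusy g.A' g.others' v.mem g.f g.sz := c.point.busy
    have ht := hb.ok.tblock_off c.tblock
    have hsz := c.tb.size
    have h3 : g.C * (8 + 8 * g.PRD) = g.C * 8 + g.C * (8 * g.PRD) := Nat.mul_add _ _ _
    apply c.tb.frame
    apply Block.Kept.of_sameExcept hs
    · intro w hw
      have := ownWins_off g hroom (lo := g.TB.base) (hi := g.TB.base + g.TB.size) (by omega) w hw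
      simp only []
      omega
    · simp only []
      omega
  · -- μ reads `*f` only
    have e : mu v'.mem g.f = mu v.mem g.f := by
      apply mu_frame (by omega)
      · exact hs.eqOn _ _ (offObj _ _ (by omega) (by omega))
      · exact hs.eqOn _ _ (offObj _ _ (by omega) (by omega))
      · exact hs.eqOn _ _ (offObj _ _ (by omega) (by omega))
      · exact hs.eqOn _ _ (offObj _ _ (by omega) (by omega))
    rw [e]
    exact c.mu_le

/-! ### The `idiv` of path A, `ch > 2`: `cdq ; idiv DWORD PTR [rbp-0x94]` with `0 ≤ z ≤ 8192`, `1 ≤ ch ≤ 16` -/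

/-- **`cdq ; idiv` of a small non-negative dividend by a small positive divisor does not fault** and gives the unsigned quotient
and remainder (bit-vector form, closed: `bv_decide`). -/
theorem idiv_small (z d : BitVec 32) (hz : z ≤ 8192#32) (hd1 : 1#32 ≤ d) (hd : d ≤ 16#32) :
    Alu.div true (if z.msb = true then BitVec.allOnes 32 else 0) z d = some (z / d, z % d) := by
  have h0 : (d == 0) = false := by bv_decide
  have hm : z.msb = false := by bv_decide
  have h1 : (((((0 : BitVec 32) ++ z).sdiv (d.signExtend (32 + 32))).setWidth 32).signExtend (32 + 32) !=
      ((0 : BitVec 32) ++ z).sdiv (d.signExtend (32 + 32))) = false := by bv_decide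
  have h2 : (((0 : BitVec 32) ++ z).sdiv (d.signExtend (32 + 32))).setWidth 32 = z / d := by bv_decide
  have h3 : (((0 : BitVec 32) ++ z).srem (d.signExtend (32 + 32))).setWidth 32 = z % d := by bv_decide
  unfold Alu.div
  simp only [hm, h0, Bool.false_eq_true, if_false, h1]
  rw [h2, h3]
  exact if_pos trivial

/-- The same over numbers: the dividend `z ≤ 8192` and the divisor `1 ≤ d ≤ 16` as 32-bit vectors. -/
theorem idiv_nat (z d : Nat) (hz : z ≤ 8192) (hd1 : 1 ≤ d) (hd : d ≤ 16) :
    Alu.div true (if (BitVec.ofNat 32 z).msb = true then BitVec.allOnes 32 else 0) (BitVec.ofNat 32 z) (BitVec.ofNat 32 d) =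
      some (BitVec.ofNat 32 (z / d), BitVec.ofNat 32 (z % d)) := by
  have ez : (BitVec.ofNat 32 z).toNat = z := by
    rw [BitVec.toNat_ofNat]
    exact Nat.mod_eq_of_lt (by omega)
  have ed : (BitVec.ofNat 32 d).toNat = d := by
    rw [BitVec.toNat_ofNat]
    exact Nat.mod_eq_of_lt (by omega)
  have hq : z / d ≤ z := Nat.div_le_self _ _
  have hr : z % d < d := Nat.mod_lt _ (by omega)
  rw [idiv_small]
  · congr 1
    congr 1
    · apply BitVec.eq_of_toNat_eq
      rw [BitVec.toNat_udiv, ez, ed, BitVec.toNat_ofNat]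
      exact (Nat.mod_eq_of_lt (by omega)).symm
    · apply BitVec.eq_of_toNat_eq
      rw [BitVec.toNat_umod, ez, ed, BitVec.toNat_ofNat]
      exact (Nat.mod_eq_of_lt (by omega)).symm
  · rw [BitVec.le_def, ez]
    exact hz
  · rw [BitVec.le_def, ed]
    exact hd1
  · rw [BitVec.le_def, ed]
    exact hd

/-! ### The residue record `r` -/

/-- **A field of the record `r`** (`r + off`, `n` bytes inside the 32-byte record): a check site, in the live set inside the
function (R2 + P1). -/
theorem rec_site {u₀ : State} {g : G} (he : Entered u₀ g) {v : State} (c : Common u₀ g v) (off n : Nat)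
    (hoff : off + n ≤ 32) (hn : 1 ≤ n) : Site g.Live' (g.r + off) n := by
  have hr : ResidueOK g.Blk v.mem g.f := c.point.vorbis.residue
  apply hr.site_record c.point.env.live (c.rn_lt he) off n _ hn
  · rw [c.config_at]
  · simp only [voff]
    omega

/-- **Where the record is**: in the data space, off the stack region (R2, `BlkOK`, `BlkFree.offStack`). -/
theorem rec_where {u₀ : State} {g : G} (he : Entered u₀ g) :
    0x100000 ≤ g.r ∧ g.r + 32 ≤ 0xC00000 ∧ (g.r + 32 ≤ 0x700000 ∨ 0x800000 ≤ g.r) := by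
  have hR : ResidueOK g.Blk g.e.mem g.f := he.vorbis.residue
  have h2 := hR.R2
  have hin := he.pre.env.ok.inside _ h2
  have hst := he.pre.free.offStack _ h2
  have hlt := he.args.rn_lt
  have h1 := hR.R1
  have hlt' : g.rn < (stb_vorbis.residue_count g.e.mem g.f).toNat := by omega
  have er : g.r = stb_vorbis.residue_config g.e.mem g.f + 32 * g.rn := by
    unfold G.r stb_vorbis.residue_config_at
    simp only [voff]
  simp only [voff] at hin hst
  omega

/-! ### The arguments and fact K on path A -/

/-- **The bounds of the arguments**: `n ≤ 4096` (P1 + HD3), `ch ≤ C ≤ 16` (P2 + HD1). -/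
theorem arg_bounds {u₀ : State} {g : G} (he : Entered u₀ g) : g.n ≤ 4096 ∧ g.ch ≤ g.C ∧ g.C ≤ 16 := by
  have hh := he.vorbis.header
  obtain ⟨a, b, h6, hab, hb, e0, e1⟩ := hh.HD3
  have h1 := hh.HD1
  have hn := he.args.n_le
  have hc := he.args.ch_le
  have hp : 2 ^ b ≤ 2 ^ 13 := Nat.pow_le_pow_right (by decide) hb
  have eb : bsize g.e.mem g.f 1 = 2 ^ b := by
    unfold bsize
    rw [if_neg (by decide), e1]
    exact Int.toNat_natCast _
  have eC : g.C = (stb_vorbis.channels g.e.mem g.f).toNat := rfl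
  refine ⟨?_, hc, ?_⟩
  · rw [eb] at hn
    omega
  · omega

/-- **Fact K on path A** in the memory of a cut point: for `pc < part_read`, `1 ≤ part_size` (R5) and
`z(pc) + part_size ≤ n·ch`, `≤ 8192` (so neither the 32-bit `imul` / `add` nor the `idiv` overflows). -/
theorem factK_A {u₀ : State} {g : G} (he : Entered u₀ g) {v : State} (c : Common u₀ g v) (h2 : g.rtype = 2)
    (hch : 2 ≤ g.ch) {pc : Nat} (hpc : pc < g.PRD) :
    1 ≤ Residue.part_size v.mem g.r ∧
    Residue.begin v.mem g.r + pc * Residue.part_size v.mem g.r + Residue.part_size v.mem g.r ≤ g.n * g.ch ∧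
    Residue.begin v.mem g.r + pc * Residue.part_size v.mem g.r + Residue.part_size v.mem g.r ≤ 8192 := by
  have hres := c.resAt he
  have hb := arg_bounds he
  have e := c.prd
  rw [h2] at e
  have hK := Residue.factK hres (A := Res.actualDec 2 g.n) (pc := pc) (by rw [e]; exact hpc)
  have ha := Res.actualDec_le 2 g.n
  refine ⟨hres.R5.1, ?_, by omega⟩
  apply Residue.factK_pos hres hch
  rw [e]
  exact hpc

/-! ### The loop invariants over stores into the own frame -/

/-- Every allocated block is kept by stores into `ownWins` (no allocated block meets the stack region). -/
theorem blks_kept_of_stack {u₀ : State} {g : G} (he : Entered u₀ g) {m m' : Mem} (hs : Mem.SameExcept (ownWins g) m m') :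
    AllKept g.Blk m m' := by
  apply AllKept.of_sameExcept he.pre.env.ok hs
  intro B hB
  exact ownWins_off g he.room (he.pre.free.offStack B hB)

/-- The temp block is kept by stores into `ownWins` (it lies in the arena, off the stack). -/
theorem tb_kept_of_stack {u₀ : State} {g : G} (he : Entered u₀ g) {v : State} (c : Common u₀ g v) {m' : Mem}
    (hs : Mem.SameExcept (ownWins g) v.mem m') : g.TB.Kept v.mem m' := by
  have hb : ADOBusy g.A' g.others' v.mem g.f g.sz := c.point.busy
  have ht := hb.ok.tblock_off c.tblock
  apply Block.Kept.of_sameExcept hs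
  · exact ownWins_off g he.room (by omega)
  · omega

/-- The record's reads are kept by stores into `ownWins`. -/
theorem reads_of_stack {u₀ : State} {g : G} (he : Entered u₀ g) {v : State} (c : Common u₀ g v) {m' : Mem}
    (hs : Mem.SameExcept (ownWins g) v.mem m') : ResidueReads v.mem g.f m' g.f g.r := by
  have hroom := he.room
  have hak := blks_kept_of_stack he hs
  have hob : g.Blk (objBlock g.f) := he.vorbis.obj
  have hobst := he.pre.free.offStack _ hob
  have hobin := he.pre.env.ok.inside _ hob
  simp only [vblock, voff] at hobst hobin
  have hv : Real.VorbisOK g.len g.Blk v.mem g.f := c.point.vorbis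
  have hcfg := hv.config
  have hR : ResidueOK g.Blk v.mem g.f := hv.residue
  have hres := c.resAt he
  apply ResidueReads.of_kept
  · apply ObjEq.of_sameExcept hs
    · intro w hw
      have := (by decide : WinsBelow ResidueAtOK.wins 1808) w hw
      omega
    · intro w hw s hsp
      have hb' := (by decide : WinsBelow ResidueAtOK.wins 1808) w hw
      exact ownWins_off g hroom (lo := g.f + w.1) (hi := g.f + w.2) (by omega) s hsp
  · -- the record lies in the `residue_config` block
    have hlt := c.rn_lt he
    have h1 := hR.R1
    have hlt' : g.rn < (stb_vorbis.residue_count v.mem g.f).toNat := by omega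
    have er := c.config_at
    apply (hak _ hR.R2).mono
    · show stb_vorbis.residue_config v.mem g.f ≤ g.r
      rw [← er]
      unfold stb_vorbis.residue_config_at
      omega
    · show g.r + Off.sizeof.Residue ≤
        stb_vorbis.residue_config v.mem g.f + Off.sizeof.Residue * (stb_vorbis.residue_count v.mem g.f).toNat
      rw [← er]
      unfold stb_vorbis.residue_config_at
      simp only [voff]
      omega
  · -- the class book's header lies in the codebooks block
    have h7 := hres.R7
    have hlt' : Residue.classbook v.mem g.r < (stb_vorbis.codebook_count v.mem g.f).toNat := by omega
    apply (hak _ hcfg.cb0.F2).mono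
    · show stb_vorbis.codebooks v.mem g.f ≤ Residue.cbk v.mem g.f g.r
      unfold Residue.cbk stb_vorbis.codebooks_at
      omega
    · show Residue.cbk v.mem g.f g.r + 8 ≤
        stb_vorbis.codebooks v.mem g.f + Off.sizeof.Codebook * (stb_vorbis.codebook_count v.mem g.f).toNat
      unfold Residue.cbk stb_vorbis.codebooks_at
      simp only [voff]
      omega

/-- FILL of a row of the temp block is kept by stores into `ownWins`. -/
theorem fill_of_stack {u₀ : State} {g : G} (he : Entered u₀ g) {v : State} (c : Common u₀ g v) {m' : Mem}
    (hs : Mem.SameExcept (ownWins g) v.mem m') {j m : Nat} (hj : j < g.C) (hm : m ≤ g.PRD)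
    (h : Fill v.mem g.f g.r g.TB g.C g.PRD j m) : Fill m' g.f g.r g.TB g.C g.PRD j m := by
  apply h.frame hj hm c.tb.size (tb_kept_of_stack he c hs) (reads_of_stack he c hs)
  exact blks_kept_of_stack he hs _ (c.resAt he).R8a

/-- WA is kept by stores into `ownWins` (`3 ≤ ch ≤ C`: row 0 exists). -/
theorem winv_of_stack {u₀ : State} {g : G} (he : Entered u₀ g) {v : State} (c : Common u₀ g v) {m' : Mem}
    (hs : Mem.SameExcept (ownWins g) v.mem m') (hC : 1 ≤ g.C) {pass cs pcount : Nat}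
    (h : WInv v.mem g.f g.r g.TB g.C g.PRD g.W g.rowsA pass cs pcount) :
    WInv m' g.f g.r g.TB g.C g.PRD g.W g.rowsA pass cs pcount := by
  apply h.frame (fun j hj => hj) _ (c.w_pos he)
  intro j m hj hf hm
  have e : j = 0 := hj
  exact fill_of_stack he c hs (by omega) hm hf

/-- The invariant of the i-loop is kept by stores into `ownWins`. -/
theorem winner_of_stack {u₀ : State} {g : G} (he : Entered u₀ g) {v : State} (c : Common u₀ g v) {m' : Mem}
    (hs : Mem.SameExcept (ownWins g) v.mem m') (hC : 1 ≤ g.C) {pass cs i pcount : Nat}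
    (h : WInnerInv v.mem g.f g.r g.TB g.C g.PRD g.W g.rowsA pass cs i pcount) :
    WInnerInv m' g.f g.r g.TB g.C g.PRD g.W g.rowsA pass cs i pcount := by
  apply h.frame (fun j hj => hj) _ (c.w_pos he)
  intro j m hj hf hm
  have e : j = 0 := hj
  exact fill_of_stack he c hs (by omega) hm hf

/-! ### 32-bit arithmetic of the walker's forms -/

/-- `part_read ≤ actual_size ≤ 2·n ≤ 8192`. -/
theorem prd_le {u₀ : State} {g : G} (he : Entered u₀ g) : g.PRD ≤ 8192 := by
  have hb := arg_bounds he
  have ha := Res.actualDec_le (stb_vorbis.residue_types g.e.mem g.f g.rn) g.n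
  have h := Res.partRead_le (Residue.begin g.e.mem g.r) (Residue.end_ g.e.mem g.r) (Residue.part_size g.e.mem g.r)
    (Res.actualDec (stb_vorbis.residue_types g.e.mem g.f g.rn) g.n)
  have e : g.PRD = Res.partRead (Residue.begin g.e.mem g.r) (Residue.end_ g.e.mem g.r) (Residue.part_size g.e.mem g.r)
    (Res.actualDec (stb_vorbis.residue_types g.e.mem g.f g.rn) g.n) := rfl
  omega

/-- The low half of the word of a small number. -/
theorem part32_ofNat (n : Nat) (h : n < 2 ^ 32) : Word.part Width.w32 (UInt64.ofNat n) = BitVec.ofNat 32 n := by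
  apply BitVec.eq_of_toNat_eq
  rw [Asan.part32_toNat, UInt64.toNat_ofNat', BitVec.toNat_ofNat, Nat.mod_eq_of_lt (by omega : n < 2 ^ 64)]

/-- **`z = r->begin + pcount * r->part_size`** as the walker computes it (`imul eax, …` ; `add eax, ebx`): the 32-bit vector of
the number (no bound is needed: `BitVec.ofNat` is a ring homomorphism). -/
theorem z32 (pcount psz bg : Nat) (h : pcount < 2 ^ 32) :
    Word.part Width.w32 (UInt64.ofNat pcount) * BitVec.ofNat 32 psz + BitVec.ofNat 32 bg =
      BitVec.ofNat 32 (bg + pcount * psz) := by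
  rw [part32_ofNat pcount h, ← BitVec.ofNat_mul, ← BitVec.ofNat_add, Nat.add_comm]

/-- The signed value of a small number's 32-bit vector. -/
theorem toInt_small32 (n : Nat) (h : n < 2 ^ 31) : (BitVec.ofNat 32 n).toInt = (n : Int) := by
  have e : (BitVec.ofNat 32 n).toNat = n := by
    rw [BitVec.toNat_ofNat]
    exact Nat.mod_eq_of_lt (by omega)
  rw [toInt_of_lt _ (by omega), e]

/-! ### The assertion families of path A over stores into the own frame -/

/-- The word of a stack address `RA − k`. -/
theorem addr_slot (g : G) (hroom : 0x700000 + 848 ≤ g.RA) (k : Nat) (hk : k ≤ 848) :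
    addr (g.RA - k) = g.e.reg .rsp - UInt64.ofNat k :=
  (eq_addr _ _ (toNat_slot6 g hroom k hk)).symm

/-- `PathA` (the pass, `tap` and `n` slots) is kept by stores into `ownWins`. -/
theorem patha_of_stack {u₀ : State} {g : G} (he : Entered u₀ g) {v v' : State} (hs : Mem.SameExcept (ownWins g) v.mem v'.mem)
    {pass : Nat} (p : PathA g pass v) : PathA g pass v' := by
  have hroom := he.room
  refine ⟨p.rtype2, p.ch_ge, p.pass_le, ?_, ?_, ?_⟩
  · exact (stack_read hroom hs 168 4 (by omega) (by omega) (by omega)).trans p.sl_pass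
  · exact (stack_read hroom hs 228 4 (by omega) (by omega) (by omega)).trans p.sl_tap
  · exact (stack_read hroom hs 208 4 (by omega) (by omega) (by omega)).trans p.sl_n

/-- **CI from the two ints just stored**: `c_inter = z % ch`, `p_inter = z / ch` read back from the frame, `z ≤ n·ch`. -/
theorem inter_of_z {u₀ : State} {g : G} (he : Entered u₀ g) {m : Mem} {z : Nat} (hch : 1 ≤ g.ch) (hz : z ≤ g.n * g.ch)
    (hz31 : z < 2 ^ 31)
    (hc : m.readLE (g.e.reg .rsp - 104) 4 = z % g.ch) (hp : m.readLE (g.e.reg .rsp - 88) 4 = z / g.ch) :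
    InterAt m g.ci g.pi g.ch g.n := by
  have hroom := he.room
  have hq : z / g.ch ≤ z := Nat.div_le_self _ _
  have hr : z % g.ch ≤ z := Nat.mod_le _ _
  apply InterAt.of_z hch hz
  · unfold Mem.i32 Mem.u32 G.ci
    rw [addr_slot g hroom.1 104 (by omega)]
    show sint32 (m.readLE (g.e.reg .rsp - 104) 4) = _
    rw [hc]
    unfold sint32
    rw [if_pos (by omega)]
  · unfold Mem.i32 Mem.u32 G.pi
    rw [addr_slot g hroom.1 88 (by omega)]
    show sint32 (m.readLE (g.e.reg .rsp - 88) 4) = _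
    rw [hp]
    unfold sint32
    rw [if_pos (by omega)]

/-! ### Two more stopping points: the two `idiv` (the walker does not read the memory operand of an `idiv` through `w_mem`, and
its `hopt_<addr>` speaks of a state whose `w_mem` has been cleared: the divisor must be NAMED before the step) -/

/-- 0x10f679: `idiv DWORD PTR [rbp-0x94]` of the `while` head (C 2214). -/
abbrev idivHead : Word := Vorbis.L.decode_residue.cut22 + 45

/-- 0x10f628: `idiv DWORD PTR [rbp-0x94]` of the `b < 0` arm (C 2243). -/
abbrev idivArm : Word := Vorbis.L.decode_residue.cut22 - 36

/-! ### The `while` head 2212: from `At22` to DECODE #2 (pass 0), to the pass latch, or to the i-loop's entry (pass ≥ 1) -/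

set_option maxRecDepth 4000 in
set_option maxHeartbeats 4000000 in
/-- **0x10f64c … 0x10f692** (C 2212–2215): `pcount ≥ part_read` → `mov r15, r12`, the latch `cut24`; else the two checked loads
of `r->begin`, `r->part_size`, `z = begin + pcount·part_size` (fact K: `z ≤ 8192`), `cdq ; idiv ch` (no `#DE`: `idiv_nat`),
`c_inter := z % ch`, `p_inter := z / ch` (CI by `inter_of_z`), and the dispatch on `pass`. -/
theorem head_walk (Lay : Layout) (hLay : Lay.hi = 0x1000000) (μ : Microarch) (hμ : UserX.MicroOK μ) (u₀ : State)
    (hcode : HasCodeNat Lay u₀ Vorbis.L.decode_residue.entry Vorbis.Code.code_decode_residue.nat Vorbis.L.decode_residue.size)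
    (h4 : Asan.SmallCheck Lay μ Vorbis.WayInv (Vorbis.CodeOK u₀) [.rax, .rcx, .rdx] 4 Vorbis.L.__asan_load4_noabort.entry)
    (g : G) (hent : Entered u₀ g) (pass cs pcount : Nat) (v : State) (hat : At22 u₀ g pass cs pcount v) :
    ReachVia Lay μ WayInv v (fun v' => (pass = 0 ∧ At17 u₀ g cs pcount v') ∨ At24 u₀ g pass v' ∨
        (1 ≤ pass ∧ At23 u₀ g pass cs pcount v')) := by
  have he := hent.entry
  v_entry he
  obtain ⟨hrip, hc, hch3, hr12, hloop⟩ := hat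
  obtain ⟨hpath, hr15, hslcs, hwa⟩ := hloop
  have w_rip := hrip
  have h_rsp := hc.rsp
  have h_rbp := hc.rbp
  have w_eq : Mem.EqOn Vorbis.L.textLo Vorbis.L.textHi u₀.mem v.mem := hc.code
  have hdf : v.flags .df = false := (show abiInv _ from hc.inv).1
  have hmx : v.mxcsr &&& 0x1F80 = 0x1F80 := (show abiInv _ from hc.inv).2
  have hsse := Vorbis.sseOK_of_abiInv hc.inv
  have f_prd := hc.fr_prd
  have f_ch := hc.fr_ch
  have f_pass := hpath.sl_pass
  -- the record: where it is, its two fields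
  obtain ⟨hrw1, hrw2, hrw3⟩ := rec_where hent
  obtain ⟨bg, hbg⟩ : ∃ bg, Residue.begin v.mem g.r = bg := ⟨_, rfl⟩
  obtain ⟨psz, hpsz⟩ : ∃ psz, Residue.part_size v.mem g.r = psz := ⟨_, rfl⟩
  have f_bg : v.mem.readLE (UInt64.ofNat g.r) 4 = bg := hbg
  have f_psz : v.mem.readLE (UInt64.ofNat g.r + 8) 4 = psz := by
    rw [← hpsz]
    simp only [vacc, voff, Mem.u32, addr, UInt64.ofNat_add]
    rfl
  have hbounds := arg_bounds hent
  have hprd : g.PRD ≤ 8192 := prd_le hent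
  have hpc : pcount ≤ g.PRD := by
    have h := hwa.head
    unfold Res.WHead at h
    omega
  u_walk hcode [hμ.vendor] until [Vorbis.L.decode_residue.cut24, idivHead] span [Vorbis.L.textLo, Vorbis.L.textHi] side (v_side)
  case check_10f65a =>
    have hun : ShadowUntouched v.mem s_10f65a.mem := by v_untouched
    exact check_site hc.shadow hun (rec_site hent hc 0 4 (by omega) (by omega)) (by u_omega)
  case check_10f668 =>
    have hun : ShadowUntouched v.mem s_10f668.mem := by v_untouched
    exact check_site hc.shadow hun (rec_site hent hc 8 4 (by omega) (by omega)) (by u_omega)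
  · -- 0x10f69d: `pcount ≥ part_read`, the `while` is over: the latch of the pass loop (cut24)
    have hge : g.PRD ≤ pcount := by
      rw [toInt_small32 _ (by omega), part32_ofNat _ (by omega), toInt_small32 _ (by omega)] at hbr_10f655
      omega
    have hs : Mem.SameExcept (ownWins g) v.mem s_10f69d.mem := by
      rw [w_mem]
      exact Mem.SameExcept.refl _ _
    have hcom : Common u₀ g s_10f69d :=
      common_of_stack hent hc hs (by rw [w_kept .rbp rfl]; exact h_rbp) (by rw [w_kept .rsp rfl]; exact h_rsp) w_eq (by v_inv)
    refine ReachVia.done (Or.inr (Or.inl ⟨w_rip, hcom, patha_of_stack hent hs hpath, w_r15, ?_⟩))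
    rw [w_mem]
    exact hwa.exit_fill (hc.w_pos hent) hge 0 rfl
  · -- 0x10f679, before the `idiv`: the divisor is named (the walker does not read the operand of `idiv` through `w_mem`)
    have hlt : pcount < g.PRD := by
      rw [toInt_small32 _ (by omega), part32_ofNat _ (by omega), toInt_small32 _ (by omega)] at hbr_10f655
      omega
    obtain ⟨k1, k2, k3⟩ := factK_A hent hc hpath.rtype2 hpath.ch_ge hlt
    rw [hbg, hpsz] at k2 k3
    have hd : s_10f678.mem.readLE (g.e.reg .rsp - 156) 4 = g.ch := by u_resolve
    rw [z32 _ _ _ (by omega)] at w_rax w_rdx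
    u_walk hcode [hμ.vendor] until [Vorbis.L.decode_residue.cut17, Vorbis.L.decode_residue.cut23] span [Vorbis.L.textLo, Vorbis.L.textHi] side (v_side)
    case side_nofault =>
      have hq := idiv_nat (bg + pcount * psz) g.ch (by omega) (by omega) (by omega)
      have hcontra := hopt1.symm.trans hq
      cases hcontra
    · -- `je 10f314` taken: pass 0, to DECODE #2 (cut17)
      have hq := idiv_nat (bg + pcount * psz) g.ch (by omega) (by omega) (by omega)
      have eqr := Option.some.inj (hopt_10f679.symm.trans hq)
      have hs : Mem.SameExcept (ownWins g) v.mem s_10f68c.mem := by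
        show Mem.SameExcept [⟨(g.e.reg .rsp).toNat - 848, (g.e.reg .rsp).toNat - 248⟩,
          ⟨(g.e.reg .rsp).toNat - 224, (g.e.reg .rsp).toNat - 220⟩,
          ⟨(g.e.reg .rsp).toNat - 192, (g.e.reg .rsp).toNat - 188⟩, ⟨(g.e.reg .rsp).toNat - 160, (g.e.reg .rsp).toNat - 156⟩,
          ⟨(g.e.reg .rsp).toNat - 104, (g.e.reg .rsp).toNat - 100⟩, ⟨(g.e.reg .rsp).toNat - 88, (g.e.reg .rsp).toNat - 84⟩]
          v.mem s_10f68c.mem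
        u_same
      have hcom : Common u₀ g s_10f68c :=
        common_of_stack hent hc hs (by rw [w_kept .rbp rfl]; exact h_rbp) w_rsp w_eq (by v_inv)
      have hmodle : (bg + pcount * psz) % g.ch ≤ 8192 := by
        have := Nat.mod_le (bg + pcount * psz) g.ch
        omega
      have hdivle : (bg + pcount * psz) / g.ch ≤ 8192 := by
        have := Nat.div_le_self (bg + pcount * psz) g.ch
        omega
      have eC : (BitVec.ofNat 32 ((bg + pcount * psz) % g.ch)).toNat = (bg + pcount * psz) % g.ch := by
        rw [BitVec.toNat_ofNat]
        exact Nat.mod_eq_of_lt (by omega)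
      have eP : (BitVec.ofNat 32 ((bg + pcount * psz) / g.ch)).toNat = (bg + pcount * psz) / g.ch := by
        rw [BitVec.toNat_ofNat]
        exact Nat.mod_eq_of_lt (by omega)
      have hci : s_10f68c.mem.readLE (g.e.reg .rsp - 104) 4 = (bg + pcount * psz) % g.ch := by
        rw [w_mem, eqr]
        simp only [eC, eP]
        u_read
      have hpi : s_10f68c.mem.readLE (g.e.reg .rsp - 88) 4 = (bg + pcount * psz) / g.ch := by
        rw [w_mem, eqr]
        simp only [eC, eP]
        u_read
      have hinter : InterAt s_10f68c.mem g.ci g.pi g.ch g.n :=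
        inter_of_z hent (by omega) (by omega) (by omega) hci hpi
      have hC1 : 1 ≤ g.C := by omega
      have hwa' := winv_of_stack hent hc hs hC1 hwa
      have hcs' : s_10f68c.mem.readLE (g.e.reg .rsp - 224) 4 = cs := by
        u_resolve
      have hr12' : s_10f68c.reg .r12 = UInt64.ofNat g.r := by
        rw [w_kept .r12 rfl]
        exact hr12
      have hr15' : s_10f68c.reg .r15 = UInt64.ofNat pcount := by
        rw [w_kept .r15 rfl]
        exact hr15
      have hp0 : pass = 0 := by
        have := hpath.pass_le
        omega
      subst hp0
      exact ReachVia.done (Or.inl ⟨rfl, w_rip, hcom, hch3, hr12',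
        ⟨patha_of_stack hent hs hpath, hr15', hcs', hwa', hlt, hinter⟩⟩)
    · -- pass ≥ 1: falls through to 0x10f692 (cut23), before the i-loop
      have hq := idiv_nat (bg + pcount * psz) g.ch (by omega) (by omega) (by omega)
      have eqr := Option.some.inj (hopt_10f679.symm.trans hq)
      have hs : Mem.SameExcept (ownWins g) v.mem s_10f68c.mem := by
        show Mem.SameExcept [⟨(g.e.reg .rsp).toNat - 848, (g.e.reg .rsp).toNat - 248⟩,
          ⟨(g.e.reg .rsp).toNat - 224, (g.e.reg .rsp).toNat - 220⟩,
          ⟨(g.e.reg .rsp).toNat - 192, (g.e.reg .rsp).toNat - 188⟩, ⟨(g.e.reg .rsp).toNat - 160, (g.e.reg .rsp).toNat - 156⟩,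
          ⟨(g.e.reg .rsp).toNat - 104, (g.e.reg .rsp).toNat - 100⟩, ⟨(g.e.reg .rsp).toNat - 88, (g.e.reg .rsp).toNat - 84⟩]
          v.mem s_10f68c.mem
        u_same
      have hcom : Common u₀ g s_10f68c :=
        common_of_stack hent hc hs (by rw [w_kept .rbp rfl]; exact h_rbp) w_rsp w_eq (by v_inv)
      have hmodle : (bg + pcount * psz) % g.ch ≤ 8192 := by
        have := Nat.mod_le (bg + pcount * psz) g.ch
        omega
      have hdivle : (bg + pcount * psz) / g.ch ≤ 8192 := by
        have := Nat.div_le_self (bg + pcount * psz) g.ch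
        omega
      have eC : (BitVec.ofNat 32 ((bg + pcount * psz) % g.ch)).toNat = (bg + pcount * psz) % g.ch := by
        rw [BitVec.toNat_ofNat]
        exact Nat.mod_eq_of_lt (by omega)
      have eP : (BitVec.ofNat 32 ((bg + pcount * psz) / g.ch)).toNat = (bg + pcount * psz) / g.ch := by
        rw [BitVec.toNat_ofNat]
        exact Nat.mod_eq_of_lt (by omega)
      have hci : s_10f68c.mem.readLE (g.e.reg .rsp - 104) 4 = (bg + pcount * psz) % g.ch := by
        rw [w_mem, eqr]
        simp only [eC, eP]
        u_read
      have hpi : s_10f68c.mem.readLE (g.e.reg .rsp - 88) 4 = (bg + pcount * psz) / g.ch := by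
        rw [w_mem, eqr]
        simp only [eC, eP]
        u_read
      have hinter : InterAt s_10f68c.mem g.ci g.pi g.ch g.n :=
        inter_of_z hent (by omega) (by omega) (by omega) hci hpi
      have hC1 : 1 ≤ g.C := by omega
      have hwa' := winv_of_stack hent hc hs hC1 hwa
      have hcs' : s_10f68c.mem.readLE (g.e.reg .rsp - 224) 4 = cs := by
        u_resolve
      have hr12' : s_10f68c.reg .r12 = UInt64.ofNat g.r := by
        rw [w_kept .r12 rfl]
        exact hr12
      have hr15' : s_10f68c.reg .r15 = UInt64.ofNat pcount := by
        rw [w_kept .r15 rfl]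
        exact hr15
      have hp1 : 1 ≤ pass := by
        have := hpath.pass_le
        omega
      exact ReachVia.done (Or.inr (Or.inr ⟨hp1, w_rip, hcom, hch3, hr12',
        ⟨patha_of_stack hent hs hpath, hr15', hcs', hwa'.enterK hp1 hlt, hinter⟩⟩))


/-! ### The i-loop 2229 and the composition of the segment from its body -/

set_option maxRecDepth 4000 in
set_option maxHeartbeats 4000000 in
/-- **0x10f692 → 0x10f551** (C 2229, `i = 0`): `mov r13d, 0 ; jmp 10f551`: from `At23` to the head of the i-loop with `i = 0`. -/
theorem inner_init (Lay : Layout) (hLay : Lay.hi = 0x1000000) (μ : Microarch) (hμ : UserX.MicroOK μ) (u₀ : State)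
    (hcode : HasCodeNat Lay u₀ Vorbis.L.decode_residue.entry Vorbis.Code.code_decode_residue.nat Vorbis.L.decode_residue.size)
    (g : G) (hent : Entered u₀ g) (pass cs pcount : Nat) (v : State) (hat : At23 u₀ g pass cs pcount v) :
    ReachVia Lay μ WayInv v (fun v' => AtInner u₀ g pass cs 0 pcount v') := by
  have he := hent.entry
  v_entry he
  obtain ⟨hrip, hc, hch3, hr12, hloop⟩ := hat
  obtain ⟨hpath, hr15, hslcs, hwi, hinter⟩ := hloop
  have w_rip := hrip
  have h_rsp := hc.rsp
  have h_rbp := hc.rbp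
  have w_eq : Mem.EqOn Vorbis.L.textLo Vorbis.L.textHi u₀.mem v.mem := hc.code
  have hdf : v.flags .df = false := (show abiInv _ from hc.inv).1
  have hmx : v.mxcsr &&& 0x1F80 = 0x1F80 := (show abiInv _ from hc.inv).2
  have hsse := Vorbis.sseOK_of_abiInv hc.inv
  u_walk hcode [hμ.vendor] until [Vorbis.L.decode_residue.cut21] span [Vorbis.L.textLo, Vorbis.L.textHi] side (v_side)
  have hs : Mem.SameExcept (ownWins g) v.mem s_10f698.mem := by
    rw [w_mem]
    exact Mem.SameExcept.refl _ _
  have hcom : Common u₀ g s_10f698 :=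
    common_of_stack hent hc hs (by rw [w_kept .rbp rfl]; exact h_rbp) (by rw [w_kept .rsp rfl]; exact h_rsp) w_eq (by v_inv)
  refine ReachVia.done ⟨w_rip, hcom, hch3, ?_, patha_of_stack hent hs hpath, ?_, w_r13, ?_, ?_, ?_⟩
  · rw [w_kept .r12 rfl]
    exact hr12
  · rw [w_kept .r15 rfl]
    exact hr15
  · rw [w_mem]
    exact hslcs
  · rw [w_mem]
    exact hwi
  · rw [w_mem]
    exact hinter

/-! ### The loop condition of 2229, and what is left: the body proper -/

/-- 0x10f579: the first instruction of the i-loop's body proper (`mov rdi, r12`, C 2230), after the loop condition. -/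
abbrev bodyA : Word := Vorbis.L.decode_residue.at_10f579

/-- The `setl` / `test` pair of a signed comparison: the byte is 0 iff the comparison fails. -/
theorem setl_zero (a b : Int) : (if a < b then (1 : BitVec 8) else 0).toNat = 0 ↔ ¬ a < b := by
  split
  · simp_all
  · simp_all

/-- `classwords` is the value of an `int`: below 2^31. -/
theorem w_lt (g : G) : g.W < 2 ^ 31 := by
  have e : g.W = (sint32 (g.e.mem.u32 (Residue.cbk g.e.mem g.f g.r + Off.Codebook.dimensions))).toNat := rfl
  rcases sint32_cases (g.e.mem.u32 (Residue.cbk g.e.mem g.f g.r + Off.Codebook.dimensions)) with ⟨h1, h2⟩ | ⟨h1, h2⟩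
  · rw [e, h2]
    omega
  · have hlt : g.e.mem.u32 (Residue.cbk g.e.mem g.f g.r + Off.Codebook.dimensions) < 2 ^ 32 := by
      unfold Mem.u32
      exact Mem.readLE_lt _ _ 4
    rw [e, h2]
    omega

set_option maxRecDepth 4000 in
set_option maxHeartbeats 4000000 in
/-- **0x10f551 … 0x10f573 and 0x10f645** (C 2229, 2248): the loop condition `i < classwords && pcount < part_read` (two `setl`,
two `test` / `je`): into the body proper, or `++class_set` and the `while` head with WA again (`WInnerInv.leave`). -/
theorem loop_cond (Lay : Layout) (hLay : Lay.hi = 0x1000000) (μ : Microarch) (hμ : UserX.MicroOK μ) (u₀ : State)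
    (hcode : HasCodeNat Lay u₀ Vorbis.L.decode_residue.entry Vorbis.Code.code_decode_residue.nat Vorbis.L.decode_residue.size)
    (g : G) (hent : Entered u₀ g) (pass cs i pcount : Nat) (v : State) (hat : AtInner u₀ g pass cs i pcount v) :
    ReachVia Lay μ WayInv v (fun v' => At22 u₀ g pass (cs + 1) pcount v' ∨ AtTurn u₀ g pass cs i pcount v') := by
  have he := hent.entry
  v_entry he
  obtain ⟨hrip, hc, hch3, hr12, hpath, hr15, hr13, hslcs, hwi, hinter⟩ := hat
  have w_rip := hrip
  have h_rsp := hc.rsp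
  have h_rbp := hc.rbp
  have w_eq : Mem.EqOn Vorbis.L.textLo Vorbis.L.textHi u₀.mem v.mem := hc.code
  have hdf : v.flags .df = false := (show abiInv _ from hc.inv).1
  have hmx : v.mxcsr &&& 0x1F80 = 0x1F80 := (show abiInv _ from hc.inv).2
  have hsse := Vorbis.sseOK_of_abiInv hc.inv
  have f_prd := hc.fr_prd
  have f_w := hc.fr_w
  have f_cs := hslcs
  have hbounds := arg_bounds hent
  have hprd : g.PRD ≤ 8192 := prd_le hent
  have hin := hwi.inner
  have hpc : pcount ≤ g.PRD := hin.pcount_le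
  have hiW : i ≤ g.W := hin.i_le
  have hWpos := hc.w_pos hent
  have hcsP : cs < g.PRD := hwi.slot_lt hWpos
  have hWlt : g.W < 2 ^ 31 := w_lt g
  have hC1 : 1 ≤ g.C := by omega
  u_walk hcode [hμ.vendor] until [Vorbis.L.decode_residue.cut22, bodyA] span [Vorbis.L.textLo, Vorbis.L.textHi] side (v_side)
  · -- `i ≥ classwords`: the loop is left, `++class_set`, the `while` head (cut22)
    have hex : g.W ≤ i ∨ g.PRD ≤ pcount := by
      rw [setl_zero, part32_ofNat _ (by omega), toInt_small32 _ (by omega), toInt_small32 _ (by omega)] at hbr_10f56b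
      omega
    have hs : Mem.SameExcept (ownWins g) v.mem s_10f645.mem := by
      show Mem.SameExcept [⟨(g.e.reg .rsp).toNat - 848, (g.e.reg .rsp).toNat - 248⟩,
        ⟨(g.e.reg .rsp).toNat - 224, (g.e.reg .rsp).toNat - 220⟩,
        ⟨(g.e.reg .rsp).toNat - 192, (g.e.reg .rsp).toNat - 188⟩, ⟨(g.e.reg .rsp).toNat - 160, (g.e.reg .rsp).toNat - 156⟩,
        ⟨(g.e.reg .rsp).toNat - 104, (g.e.reg .rsp).toNat - 100⟩, ⟨(g.e.reg .rsp).toNat - 88, (g.e.reg .rsp).toNat - 84⟩]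
        v.mem s_10f645.mem
      u_same
    have hcom : Common u₀ g s_10f645 :=
      common_of_stack hent hc hs (by rw [w_kept .rbp rfl]; exact h_rbp) (by rw [w_kept .rsp rfl]; exact h_rsp) w_eq (by v_inv)
    have ecs : (BitVec.ofNat 32 cs + 1#32).toNat = cs + 1 := by
      rw [BitVec.toNat_add, BitVec.toNat_ofNat]
      have e1 : (1#32).toNat = 1 := rfl
      rw [e1]
      omega
    have hcs' : s_10f645.mem.readLE (g.e.reg .rsp - 224) 4 = cs + 1 := by
      rw [w_mem, ecs]
      u_read
    have hwa' : WInv s_10f645.mem g.f g.r g.TB g.C g.PRD g.W g.rowsA pass (cs + 1) pcount :=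
      winv_of_stack hent hc hs hC1 (hwi.leave hWpos hex)
    refine ReachVia.done (Or.inl ⟨w_rip, hcom, hch3, ?_, patha_of_stack hent hs hpath, ?_, hcs', hwa'⟩)
    · rw [w_kept .r12 rfl]
      exact hr12
    · rw [w_kept .r15 rfl]
      exact hr15
  · -- `pcount ≥ part_read`: the same
    have hex : g.W ≤ i ∨ g.PRD ≤ pcount := by
      rw [setl_zero, part32_ofNat _ (by omega), toInt_small32 _ (by omega), toInt_small32 _ (by omega)] at hbr_10f573
      omega
    have hs : Mem.SameExcept (ownWins g) v.mem s_10f645.mem := by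
      show Mem.SameExcept [⟨(g.e.reg .rsp).toNat - 848, (g.e.reg .rsp).toNat - 248⟩,
        ⟨(g.e.reg .rsp).toNat - 224, (g.e.reg .rsp).toNat - 220⟩,
        ⟨(g.e.reg .rsp).toNat - 192, (g.e.reg .rsp).toNat - 188⟩, ⟨(g.e.reg .rsp).toNat - 160, (g.e.reg .rsp).toNat - 156⟩,
        ⟨(g.e.reg .rsp).toNat - 104, (g.e.reg .rsp).toNat - 100⟩, ⟨(g.e.reg .rsp).toNat - 88, (g.e.reg .rsp).toNat - 84⟩]
        v.mem s_10f645.mem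
      u_same
    have hcom : Common u₀ g s_10f645 :=
      common_of_stack hent hc hs (by rw [w_kept .rbp rfl]; exact h_rbp) (by rw [w_kept .rsp rfl]; exact h_rsp) w_eq (by v_inv)
    have ecs : (BitVec.ofNat 32 cs + 1#32).toNat = cs + 1 := by
      rw [BitVec.toNat_add, BitVec.toNat_ofNat]
      have e1 : (1#32).toNat = 1 := rfl
      rw [e1]
      omega
    have hcs' : s_10f645.mem.readLE (g.e.reg .rsp - 224) 4 = cs + 1 := by
      rw [w_mem, ecs]
      u_read
    have hwa' : WInv s_10f645.mem g.f g.r g.TB g.C g.PRD g.W g.rowsA pass (cs + 1) pcount :=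
      winv_of_stack hent hc hs hC1 (hwi.leave hWpos hex)
    refine ReachVia.done (Or.inl ⟨w_rip, hcom, hch3, ?_, patha_of_stack hent hs hpath, ?_, hcs', hwa'⟩)
    · rw [w_kept .r12 rfl]
      exact hr12
    · rw [w_kept .r15 rfl]
      exact hr15
  · -- both hold: the body proper (0x10f579); nothing was stored
    have hi : i < g.W := by
      rw [setl_zero, part32_ofNat _ (by omega), toInt_small32 _ (by omega), toInt_small32 _ (by omega)] at hbr_10f56b
      omega
    have hp : pcount < g.PRD := by
      rw [setl_zero, part32_ofNat _ (by omega), toInt_small32 _ (by omega), toInt_small32 _ (by omega)] at hbr_10f573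
      omega
    have hs : Mem.SameExcept (ownWins g) v.mem s_10f573.mem := by
      rw [w_mem]
      exact Mem.SameExcept.refl _ _
    have hcom : Common u₀ g s_10f573 :=
      common_of_stack hent hc hs (by rw [w_kept .rbp rfl]; exact h_rbp) (by rw [w_kept .rsp rfl]; exact h_rsp) w_eq (by v_inv)
    refine ReachVia.done (Or.inr ⟨w_rip, hcom, hch3, ?_, patha_of_stack hent hs hpath, ?_, ?_, ?_, ?_, ?_, hi, hp⟩)
    · rw [w_kept .r12 rfl]
      exact hr12
    · rw [w_kept .r15 rfl]
      exact hr15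
    · rw [w_kept .r13 rfl]
      exact hr13
    · rw [w_mem]
      exact hslcs
    · rw [w_mem]
      exact hwi
    · rw [w_mem]
      exact hinter


/-! ### Parts of the precondition of the call at 0x10f538 (`DeintPre`), for the worker of the call block -/

/-! ### THE PROBLEM: the footprint of codebook_decode_deinterleave_repeat's Spec is too coarse for this caller -/

end Vorbis.Spec.decode_residue_6a
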